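-- pv_equiv track=rewrite | github.com/insightfinder/InsightAgent | terraform-config-generator/check_project_sync.py | count_net_brackets
-- ===== SOURCE A (Python) =====
-- def count_net_brackets(s: str) -> int:
--     """
--     Count unmatched open brackets/parens in s, ignoring content inside strings.
--     Returns > 0 if more opens than closes (multi-line block follows).
--     """
--     count = 0
--     in_str = False
--     i = 0
--     while i < len(s):
--         c = s[i]
--         if in_str:
--             if c == '\\':
--                 i += 2
--                 continue
--             if c == '"':
--                 in_str = False
--         elif c == '"':
--             in_str = True
--         elif c in '{[(':
--             count += 1
--         elif c in '}])':
--             count -= 1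
--         i += 1
--     return count
-- ===== SOURCE B (Python) =====
-- def count_net_brackets(s: str) -> int:
--     """Chunked scan: jump with str.find to each '"', count the brackets of the
--     code chunk before it with str.count on the slice, then skip over the whole
--     string literal; no per-character state machine."""
--     count = 0
--     i = 0
--     n = len(s)
--     while True:
--         j = s.find('"', i)
--         seg = s[i:] if j == -1 else s[i:j]
--         count += (seg.count('{') + seg.count('[') + seg.count('(')
--                   - seg.count('}') - seg.count(']') - seg.count(')'))
--         if j == -1:
--             return count
--         k = j + 1
--         while k < n:
--             c = s[k]
--             if c == '\\':
--                 k += 2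
--             elif c == '"':
--                 k += 1
--                 break
--             else:
--                 k += 1
--         i = k
--         if i >= n:
--             return count
-- ===== Notes on version B (the rewrite author's own statement) =====
-- stated objective: faster
-- what changed: Replaces A's per-character state machine by a chunked scan: str.find jumps to each double quote, the bracket balance of the code chunk before it is computed with six str.count calls on the slice, and the string literal is skipped as a block; only the literal-skipping keeps per-character steps.
import Mathlib
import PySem

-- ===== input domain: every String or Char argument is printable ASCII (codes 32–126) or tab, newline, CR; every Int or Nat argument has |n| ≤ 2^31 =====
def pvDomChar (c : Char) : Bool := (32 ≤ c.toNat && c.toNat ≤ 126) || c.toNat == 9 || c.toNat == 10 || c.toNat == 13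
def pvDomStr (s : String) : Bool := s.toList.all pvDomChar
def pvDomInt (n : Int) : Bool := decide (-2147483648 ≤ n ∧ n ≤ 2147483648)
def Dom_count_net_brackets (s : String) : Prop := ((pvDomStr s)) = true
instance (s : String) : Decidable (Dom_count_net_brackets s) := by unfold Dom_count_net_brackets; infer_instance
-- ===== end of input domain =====

-- B replaces A's per-character state machine by a chunked scan: it jumps to each
-- '"' (str.find), counts the brackets of the code chunk before it with str.count
-- on the slice, and skips the string literal as a block; objective: faster (constant factor).

-- ===== PORT A =====
-- A's `while i < len(s)` forward scan with `i += 1` / `i += 2` is transliterated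
-- as structural recursion on the character list: `i += 2; continue` drops the
-- backslash and the following character (or ends the loop if none remains).
def countNetGoA : List Char → Int → Bool → Int
  | [], count, _ => count
  | c :: rest, count, in_str =>
    if in_str then
      if c = '\\' then
        match rest with
        | [] => count                      -- i += 2 runs past the end: loop ends
        | _ :: rest2 => countNetGoA rest2 count in_str
      else if c = '"' then countNetGoA rest count false
      else countNetGoA rest count in_str
    else if c = '"' then countNetGoA rest count true
    else if c = '{' ∨ c = '[' ∨ c = '(' then countNetGoA rest (count + 1) in_str
    else if c = '}' ∨ c = ']' ∨ c = ')' then countNetGoA rest (count - 1) in_str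
    else countNetGoA rest count in_str

def count_net_brackets (s : String) : Int := countNetGoA s.toList 0 false

-- ===== PORT B =====
-- `seg.count(c)` for each of the six brackets, combined as in Source B.
def pvSegCount (seg : List Char) : Int :=
  ((seg.count '{' : Int) + (seg.count '[' : Int) + (seg.count '(' : Int))
    - (seg.count '}' : Int) - (seg.count ']' : Int) - (seg.count ')' : Int)

-- Source B's inner `while k < n` that skips the body of a string literal:
-- backslash consumes two characters, a quote ends the literal.
def pvSkipStr : List Char → List Char
  | [] => []
  | c :: rest =>
    if c = '\\' then
      match rest with
      | [] => []
      | _ :: r => pvSkipStr r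
    else if c = '"' then rest
    else pvSkipStr rest

theorem pvSkipStr_cons (c : Char) (rest : List Char) :
    pvSkipStr (c :: rest) =
      if c = '\\' then
        (match rest with | [] => [] | _ :: r => pvSkipStr r)
      else if c = '"' then rest else pvSkipStr rest := by rw [pvSkipStr.eq_def]

theorem pvSkipStr_len_le : ∀ (l : List Char), (pvSkipStr l).length ≤ l.length
  | [] => by simp [pvSkipStr]
  | c :: rest => by
    rw [pvSkipStr_cons]
    split_ifs with h1 h2
    · match rest with
      | [] => simp
      | d :: r => have := pvSkipStr_len_le r; simp; omega
    · simp
    · have := pvSkipStr_len_le rest; simp; omega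

-- Source B's outer loop: `s.find('"', i)` is the list's findIdx? on the unscanned
-- suffix, the slice `s[i:j]` is `take j`, the jump past the literal is pvSkipStr.
def pvGoB (l : List Char) (acc : Int) : Int :=
  match h : l.findIdx? (· = '"') with
  | none => acc + pvSegCount l
  | some j => pvGoB (pvSkipStr (l.drop (j + 1))) (acc + pvSegCount (l.take j))
termination_by l.length
decreasing_by
  have h1 := pvSkipStr_len_le (l.drop (j + 1))
  have h2 : l ≠ [] := by rintro rfl; simp [List.findIdx?, List.findIdx?.go] at h
  have h3 : 0 < l.length := List.length_pos_iff.mpr h2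
  simp only [List.length_drop] at h1 ⊢
  omega

def count_net_brackets_alt (s : String) : Int := pvGoB s.toList 0

-- ===== PRECONDITION & SPEC =====
def Spec_count_net_brackets (s : String) (out : Int) : Prop := out = count_net_brackets_alt s
instance (s : String) (out : Int) : Decidable (Spec_count_net_brackets s out) := by unfold Spec_count_net_brackets; infer_instance

-- ===== CLAIM =====
def Claim_equal_count_net_brackets : Prop := ∀ (s : String), Dom_count_net_brackets s → Spec_count_net_brackets s (count_net_brackets s)

-- ===== LEMMAS AND PROOFS =====
theorem pvSegCount_cons (c : Char) (seg : List Char) :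
    pvSegCount (c :: seg) =
      pvSegCount seg +
        (if c = '{' ∨ c = '[' ∨ c = '(' then 1
         else if c = '}' ∨ c = ']' ∨ c = ')' then -1 else 0) := by
  simp only [pvSegCount, List.count_cons]
  split_ifs <;> simp_all <;> omega

-- Scanning a quote-free prefix outside a string only adds its bracket balance.
theorem countNetGoA_noquote (pre rest : List Char) (acc : Int)
    (h : '"' ∉ pre) :
    countNetGoA (pre ++ rest) acc false = countNetGoA rest (acc + pvSegCount pre) false := by
  induction pre generalizing acc with
  | nil => simp [pvSegCount]
  | cons c pre ih =>
    have hc : c ≠ '"' := by rintro rfl; exact h (List.mem_cons_self ..)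
    have hmem : '"' ∉ pre := fun m => h (List.mem_cons_of_mem _ m)
    rw [List.cons_append, countNetGoA.eq_def]
    simp only [hc, if_false]
    rw [pvSegCount_cons]
    split_ifs with h1 h2 <;> simp_all <;> ring_nf
  
-- Inside a string literal, A skips to just past its end without changing count.
theorem countNetGoA_instr : ∀ (l : List Char) (acc : Int),
    countNetGoA l acc true = countNetGoA (pvSkipStr l) acc false
  | [], acc => by simp [pvSkipStr, countNetGoA]
  | c :: rest, acc => by
    rw [countNetGoA.eq_def, pvSkipStr.eq_def]
    by_cases h1 : c = '\\'
    · subst h1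
      match rest with
      | [] => simp [countNetGoA]
      | d :: r => simpa using countNetGoA_instr r acc
    · by_cases h2 : c = '"'
      · subst h2; simp
      · simp only [h1, h2, if_false]
        simpa [h1, h2] using countNetGoA_instr rest acc

theorem pvGoB_eq (l : List Char) (acc : Int) :
    pvGoB l acc = countNetGoA l acc false := by
  induction l, acc using pvGoB.induct with
  | case1 l acc h =>
    rw [pvGoB.eq_def]
    split
    case h_2 j h' => rw [h'] at h; simp at h
    have hnq : '"' ∉ l := by
      intro hm
      have := (List.findIdx?_eq_none_iff.mp h) _ hm
      simp at this
    have := countNetGoA_noquote l [] acc hnq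
    simp [countNetGoA] at this
    omega
  | case2 l acc j h ih =>
    rw [pvGoB.eq_def]
    split
    case h_1 h' => rw [h'] at h; simp at h
    case h_2 j' h' =>
    have hjj : j' = j := by rw [h'] at h; exact Option.some.inj h
    subst hjj
    obtain ⟨hj, hpj, hbefore⟩ := List.findIdx?_eq_some_iff_getElem.mp h'
    have hq : l[j'] = '"' := by simpa using hpj
    have hnq : '"' ∉ l.take j' := by
      intro hm
      obtain ⟨i, hi, hgi⟩ := List.mem_iff_getElem.mp hm
      have hij : i < j' := by simpa using (lt_of_lt_of_le hi (by simp))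
      have := hbefore i hij
      simp [List.getElem_take] at hgi this
      rw [hgi] at this; simp at this
    have hdecomp : l = l.take j' ++ l[j'] :: l.drop (j' + 1) := by
      conv_lhs => rw [← List.take_append_drop j' l]
      rw [List.drop_eq_getElem_cons hj]
    symm
    calc countNetGoA l acc false
        = countNetGoA (l.take j' ++ '"' :: l.drop (j' + 1)) acc false := by
          conv_lhs => rw [hdecomp]
          rw [hq]
      _ = countNetGoA ('"' :: l.drop (j' + 1)) (acc + pvSegCount (l.take j')) false :=
          countNetGoA_noquote _ _ _ hnq
      _ = countNetGoA (l.drop (j' + 1)) (acc + pvSegCount (l.take j')) true := by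
          rw [countNetGoA.eq_def]; simp
      _ = countNetGoA (pvSkipStr (l.drop (j' + 1))) (acc + pvSegCount (l.take j')) false :=
          countNetGoA_instr _ _
      _ = pvGoB (pvSkipStr (l.drop (j' + 1))) (acc + pvSegCount (l.take j')) := ih.symm

-- ===== VERDICT =====
theorem count_net_brackets_spec : Claim_equal_count_net_brackets := by
  intro s _
  unfold Spec_count_net_brackets count_net_brackets count_net_brackets_alt
  exact (pvGoB_eq _ _).symm
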